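-- pv_equiv track=rewrite | github.com/shushuzh/Stats507 | hw2/hw2.py | distinct_c
-- ===== SOURCE A (Python) =====
-- def distinct_c(sample_list, key_ele=0):
--     res = dict()
--     for m in range(len(sample_list)):
--         if sample_list[m][key_ele] in res:
--             res[sample_list[m][key_ele]] = max(res[sample_list[m][key_ele]],
--                                                sample_list[m])
--         else:
--             res[sample_list[m][key_ele]] = sample_list[m]
--     res = sorted(list(res.values()))
--     return(res)
-- ===== SOURCE B (Python) =====
-- def distinct_c(sample_list, key_ele=0):
--     # Sort once by the key element (stable), then sweep the contiguous runs,
--     # keeping the lexicographically largest full tuple of each run.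
--     ordered = sorted(sample_list, key=lambda t: t[key_ele])
--     winners = []
--     for t in ordered:
--         if winners and winners[-1][key_ele] == t[key_ele]:
--             if t > winners[-1]:
--                 winners[-1] = t
--         else:
--             winners.append(t)
--     return sorted(winners)
-- ===== Notes on version B (the rewrite author's own statement) =====
-- stated objective: alternative
-- what changed: Replaces the dict-membership pass (hash map keyed by the tuple element, max kept per key, then sorted(values)) by a sort-then-sweep: sort once by the key element, walk the contiguous equal-key runs keeping the lexicographically largest full tuple of each run, then sort the winners.
import Mathlib
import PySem

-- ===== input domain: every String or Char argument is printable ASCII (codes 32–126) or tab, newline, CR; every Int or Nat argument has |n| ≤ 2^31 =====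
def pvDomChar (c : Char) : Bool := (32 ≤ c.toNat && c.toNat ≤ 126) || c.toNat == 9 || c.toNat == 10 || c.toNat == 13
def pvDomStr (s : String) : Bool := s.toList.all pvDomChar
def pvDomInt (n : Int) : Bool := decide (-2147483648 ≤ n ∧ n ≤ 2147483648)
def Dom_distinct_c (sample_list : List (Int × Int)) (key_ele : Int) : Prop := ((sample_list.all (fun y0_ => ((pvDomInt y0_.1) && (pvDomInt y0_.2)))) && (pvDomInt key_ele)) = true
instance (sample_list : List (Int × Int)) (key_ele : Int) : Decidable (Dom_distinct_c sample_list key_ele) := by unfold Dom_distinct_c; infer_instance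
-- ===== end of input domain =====

-- B replaces A's hash-dict membership pass by a sort-then-sweep over contiguous equal-key runs (alternative decomposition, same cost).

-- shared helpers: t[key_ele] on a 2-tuple (total guard; Pre_ excludes the raising indices), Python's lexicographic < and max on 2-tuples
def pvKey (key_ele : Int) (t : Int × Int) : Int := if key_ele = 0 ∨ key_ele = -2 then t.1 else t.2
def pvLt (a b : Int × Int) : Bool := decide (a.1 < b.1) || (decide (a.1 = b.1) && decide (a.2 < b.2))
def pvMax (a b : Int × Int) : Int × Int := if pvLt a b then b else a   -- max(a, b): b iff b > a

-- ===== PORT A =====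
def distinct_c (sample_list : List (Int × Int)) (key_ele : Int) : List (Int × Int) :=
  let res : PySem.Dict Int (Int × Int) :=
    (PySem.List.pyRange 0 (PySem.List.len sample_list)).foldl
      (fun d m =>
        let t := PySem.List.pyGetD sample_list m (0, 0)   -- sample_list[m]; m is always in range
        let c := pvKey key_ele t
        if d.contains c then d.insert c (pvMax (d.getD c t) t) else d.insert c t)
      PySem.Dict.empty
  PySem.List.sorted2 res.values (·.1) (·.2)

-- ===== PORT B =====
def distinct_c_alt (sample_list : List (Int × Int)) (key_ele : Int) : List (Int × Int) :=
  let ordered := PySem.List.sorted sample_list (pvKey key_ele)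
  let winners := ordered.foldl
    (fun acc t =>
      match acc.getLast? with   -- winners[-1] (none iff winners is empty)
      | some w =>
        if pvKey key_ele w = pvKey key_ele t then
          (if pvLt w t then acc.dropLast ++ [t] else acc)   -- winners[-1] = t  iff  t > winners[-1]
        else acc ++ [t]
      | none => acc ++ [t]) []
  PySem.List.sorted2 winners (·.1) (·.2)

-- ===== PRECONDITION & SPEC =====
-- Pre_ excludes exactly the inputs where A raises IndexError: a nonempty list with key_ele outside {-2,-1,0,1}.
def Pre_distinct_c (sample_list : List (Int × Int)) (key_ele : Int) : Prop :=
  sample_list = [] ∨ key_ele = 0 ∨ key_ele = 1 ∨ key_ele = -1 ∨ key_ele = -2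
instance (sample_list : List (Int × Int)) (key_ele : Int) : Decidable (Pre_distinct_c sample_list key_ele) := by unfold Pre_distinct_c; infer_instance
def pvWitness_distinct_c : (List (Int × Int)) × Int := ([(1, 2), (1, 3), (0, 5)], 0)

def Spec_distinct_c (sample_list : List (Int × Int)) (key_ele : Int) (out : List (Int × Int)) : Prop := out = distinct_c_alt sample_list key_ele
instance (sample_list : List (Int × Int)) (key_ele : Int) (out : List (Int × Int)) : Decidable (Spec_distinct_c sample_list key_ele out) := by unfold Spec_distinct_c; infer_instance

-- ===== CLAIM (what is proved, stated in full; the proofs are below) =====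
def Claim_equal_distinct_c : Prop := ∀ (sample_list : List (Int × Int)) (key_ele : Int), Dom_distinct_c sample_list key_ele → Pre_distinct_c sample_list key_ele → Spec_distinct_c sample_list key_ele (distinct_c sample_list key_ele)

-- ===== LEMMAS AND PROOFS =====

-- pvLt is Python's strict lexicographic comparison = '<' on Lex (Int × Int)
theorem pvLt_iff (a b : Int × Int) : pvLt a b = true ↔ toLex a < toLex b := by
  simp [pvLt, Prod.Lex.toLex_lt_toLex]

theorem pvLt_false_iff (a b : Int × Int) : pvLt a b = false ↔ toLex b ≤ toLex a := by
  rw [← Bool.not_eq_true, pvLt_iff, not_lt]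

-- a list of per-key winners: distinct keys, each element a key-maximal member of xs, every key of xs covered
def GoodW (k : (Int × Int) → Int) (xs w : List (Int × Int)) : Prop :=
  (w.map k).Nodup ∧
  (∀ t ∈ w, t ∈ xs ∧ ∀ u ∈ xs, k u = k t → toLex u ≤ toLex t) ∧
  (∀ u ∈ xs, ∃ t ∈ w, k t = k u)

theorem goodW_perm (k : (Int × Int) → Int) (xs w₁ w₂ : List (Int × Int))
    (h₁ : GoodW k xs w₁) (h₂ : GoodW k xs w₂) : w₁.Perm w₂ := by
  obtain ⟨n₁, m₁, c₁⟩ := h₁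
  obtain ⟨n₂, m₂, c₂⟩ := h₂
  have key : ∀ (wa wb : List (Int × Int)),
      (∀ t ∈ wa, t ∈ xs ∧ ∀ u ∈ xs, k u = k t → toLex u ≤ toLex t) →
      (∀ t ∈ wb, t ∈ xs ∧ ∀ u ∈ xs, k u = k t → toLex u ≤ toLex t) →
      (∀ u ∈ xs, ∃ t ∈ wb, k t = k u) → ∀ t ∈ wa, t ∈ wb := by
    intro wa wb ma mb cb t ht
    obtain ⟨hx, hmax⟩ := ma t ht
    obtain ⟨t', ht', hk⟩ := cb t hx
    obtain ⟨hx', hmax'⟩ := mb t' ht'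
    have h1 : toLex t ≤ toLex t' := hmax' t hx hk.symm
    have h2 : toLex t' ≤ toLex t := hmax t' hx' hk
    have : t' = t := toLex.injective (le_antisymm h2 h1)
    exact this ▸ ht'
  rw [List.perm_ext_iff_of_nodup (n₁.of_map k) (n₂.of_map k)]
  intro a
  exact ⟨fun h => key w₁ w₂ m₁ m₂ c₂ a h, fun h => key w₂ w₁ m₂ m₁ c₁ a h⟩

-- Python's sorted() on 2-tuples is the stable sort by the lexicographic (linear) order on Lex (Int × Int)
theorem sorted2_eq_sorted_lex (xs : List (Int × Int)) :
    PySem.List.sorted2 xs (·.1) (·.2) = PySem.List.sorted xs (fun p => toLex p) := by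
  show List.foldl _ [] xs = List.foldl _ [] xs
  congr 1
  funext acc x
  congr 1
  funext a b
  show (decide (a.1 < b.1) || (!decide (b.1 < a.1) && decide (a.2 < b.2)))
      = decide (toLex a < toLex b)
  rw [Bool.eq_iff_iff]
  simp only [Bool.or_eq_true, Bool.and_eq_true, Bool.not_eq_true', decide_eq_true_eq,
    decide_eq_false_iff_not, not_lt, Prod.Lex.toLex_lt_toLex]
  omega

theorem sorted2_congr_perm (w₁ w₂ : List (Int × Int)) (h : w₁.Perm w₂) :
    PySem.List.sorted2 w₁ (·.1) (·.2) = PySem.List.sorted2 w₂ (·.1) (·.2) := by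
  rw [sorted2_eq_sorted_lex, sorted2_eq_sorted_lex]
  refine PySem.List.eq_of_perm_of_pairwise_le_of_injective (fun p => toLex p) toLex.injective
    ?_ (PySem.List.sorted_pairwise _ _) (PySem.List.sorted_pairwise _ _)
  exact ((PySem.List.sorted_perm w₁ _ false).trans h).trans (PySem.List.sorted_perm w₂ _ false).symm

-- ---------- side A: the dict pass ----------

def stepA (k : (Int × Int) → Int) (d : PySem.Dict Int (Int × Int)) (t : Int × Int) : PySem.Dict Int (Int × Int) :=
  if d.contains (k t) then d.insert (k t) (pvMax (d.getD (k t) t) t) else d.insert (k t) t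

def InvA (k : (Int × Int) → Int) (seen : List (Int × Int)) (d : PySem.Dict Int (Int × Int)) : Prop :=
  (d.items.map (·.1)).Nodup ∧
  (∀ p ∈ d.items, p.1 = k p.2 ∧ p.2 ∈ seen ∧ ∀ u ∈ seen, k u = p.1 → toLex u ≤ toLex p.2) ∧
  (∀ u ∈ seen, d.contains (k u) = true)

theorem pvMax_bounds (w t : Int × Int) :
    toLex w ≤ toLex (pvMax w t) ∧ toLex t ≤ toLex (pvMax w t) ∧ (pvMax w t = w ∨ pvMax w t = t) := by
  by_cases hb : pvLt w t = true
  · have h : pvMax w t = t := by simp [pvMax, hb]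
    rw [h]
    exact ⟨le_of_lt ((pvLt_iff w t).mp hb), le_refl _, Or.inr rfl⟩
  · have h : pvMax w t = w := by simp [pvMax, hb]
    rw [h]
    exact ⟨le_refl _, (pvLt_false_iff w t).mp (by simpa using hb), Or.inl rfl⟩

theorem invA_step (k : (Int × Int) → Int) (seen : List (Int × Int)) (d : PySem.Dict Int (Int × Int))
    (t : Int × Int) (h : InvA k seen d) : InvA k (seen ++ [t]) (stepA k d t) := by
  obtain ⟨hn, hm, hc⟩ := h
  by_cases hcont : d.contains (k t) = true
  · have hfind : (d.items.find? (fun p => p.1 == k t)).isSome := by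
      rw [List.find?_isSome]
      simpa [PySem.Dict.contains, List.any_eq_true] using hcont
    obtain ⟨q, hq⟩ := Option.isSome_iff_exists.mp hfind
    have hqmem : q ∈ d.items := List.mem_of_find?_eq_some hq
    have hqk : q.1 = k t := by simpa using List.find?_some hq
    have hgetD : d.getD (k t) t = q.2 := by
      simp [PySem.Dict.getD, PySem.Dict.get?, hq]
    have huniq : ∀ p ∈ d.items, p.1 = k t → p = q :=
      fun p hp hpk => List.inj_on_of_nodup_map hn hp hqmem (by rw [hpk, hqk])
    obtain ⟨hwv, htv, hvor⟩ := pvMax_bounds q.2 t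
    have hstep : (stepA k d t).items
        = d.items.map (fun p => if p.1 == k t then (k t, pvMax q.2 t) else p) := by
      simp [stepA, hcont, PySem.Dict.insert, hgetD]
    have hkeys : (stepA k d t).items.map (·.1) = d.items.map (·.1) := by
      rw [hstep, List.map_map]
      exact List.map_congr_left (fun p _ => by by_cases hb : p.1 = k t <;> simp [hb])
    refine ⟨hkeys ▸ hn, ?_, ?_⟩
    · intro p' hp'
      rw [hstep] at hp'
      obtain ⟨p, hp, rfl⟩ := List.mem_map.mp hp'
      by_cases hb : p.1 = k t
      · have hpq : p = q := huniq p hp hb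
        rw [if_pos (by simpa using hb)]
        have hkv : k t = k (pvMax q.2 t) := by
          rcases hvor with h | h
          · rw [h, ← hqk]; exact (hm q hqmem).1
          · rw [h]
        refine ⟨hkv, ?_, ?_⟩
        · rcases hvor with h | h
          · rw [h]; exact List.mem_append_left _ (hm q hqmem).2.1
          · rw [h]; exact List.mem_append_right _ (by simp)
        · intro u hu hku
          rcases List.mem_append.mp hu with hu | hu
          · exact le_trans ((hm q hqmem).2.2 u hu (hku.trans hqk.symm)) hwv
          · have hu' : u = t := by simpa using hu
            rw [hu']; exact htv
      · rw [if_neg (by simpa using hb)]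
        obtain ⟨h1, h2, h3⟩ := hm p hp
        refine ⟨h1, List.mem_append_left _ h2, ?_⟩
        intro u hu hku
        rcases List.mem_append.mp hu with hu | hu
        · exact h3 u hu hku
        · have hu' : u = t := by simpa using hu
          rw [hu'] at hku; exact absurd hku.symm hb
    · intro u hu
      have hcontains : ∀ x, (stepA k d t).contains x = d.contains x := by
        intro x
        simp only [PySem.Dict.contains]
        rw [show (stepA k d t).items.any (fun p => p.1 == x) = ((stepA k d t).items.map (·.1)).any (fun y => y == x) by
              rw [List.any_map]; rfl,
            hkeys,
            show (d.items.map (·.1)).any (fun y => y == x) = d.items.any (fun p => p.1 == x) by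
              rw [List.any_map]; rfl]
      rw [hcontains]
      rcases List.mem_append.mp hu with hu | hu
      · exact hc u hu
      · have hu' : u = t := by simpa using hu
        rw [hu']; exact hcont
  · have hnotkey : k t ∉ d.items.map (·.1) := by
      intro hmem
      apply hcont
      simp only [PySem.Dict.contains, List.any_eq_true]
      obtain ⟨p, hp, hpk⟩ := List.mem_map.mp hmem
      exact ⟨p, hp, by simp [hpk]⟩
    have hstep : (stepA k d t).items = d.items ++ [(k t, t)] := by
      simp [stepA, hcont, PySem.Dict.insert]
    refine ⟨?_, ?_, ?_⟩
    · rw [hstep, List.map_append, List.nodup_append]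
      refine ⟨hn, List.nodup_singleton _, ?_⟩
      intro a ha b hb
      simp only [List.map_cons, List.map_nil, List.mem_singleton] at hb
      subst hb
      exact fun hab => hnotkey (hab ▸ ha)
    · intro p hp
      rw [hstep] at hp
      rcases List.mem_append.mp hp with hp | hp
      · obtain ⟨h1, h2, h3⟩ := hm p hp
        refine ⟨h1, List.mem_append_left _ h2, ?_⟩
        intro u hu hku
        rcases List.mem_append.mp hu with hu | hu
        · exact h3 u hu hku
        · have hu' : u = t := by simpa using hu
          rw [hu'] at hku
          exact absurd (hku ▸ List.mem_map_of_mem (f := (·.1)) hp) hnotkey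
      · have hp' : p = (k t, t) := by simpa using hp
        subst hp'
        refine ⟨rfl, List.mem_append_right _ (by simp), ?_⟩
        intro u hu hku
        rcases List.mem_append.mp hu with hu | hu
        · exact absurd (hku ▸ hc u hu) (by simpa using hcont)
        · have hu' : u = t := by simpa using hu
          rw [hu']
    · intro u hu
      simp only [PySem.Dict.contains, hstep, List.any_append, Bool.or_eq_true, List.any_eq_true]
      rcases List.mem_append.mp hu with hu | hu
      · exact Or.inl (by simpa [PySem.Dict.contains, List.any_eq_true] using hc u hu)
      · have hu' : u = t := by simpa using hu
        exact Or.inr ⟨(k t, t), by simp [hu']⟩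

theorem invA_foldl (k : (Int × Int) → Int) (l : List (Int × Int)) :
    ∀ (seen : List (Int × Int)) (d : PySem.Dict Int (Int × Int)), InvA k seen d →
      InvA k (seen ++ l) (l.foldl (stepA k) d) := by
  induction l with
  | nil => intro seen d h; simpa using h
  | cons t l ih =>
    intro seen d h
    have := ih (seen ++ [t]) (stepA k d t) (invA_step k seen d t h)
    simpa [List.append_assoc] using this

theorem goodW_A (k : (Int × Int) → Int) (xs : List (Int × Int)) :
    GoodW k xs (xs.foldl (stepA k) PySem.Dict.empty).values := by
  have h0 : InvA k [] PySem.Dict.empty := by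
    refine ⟨by simp [PySem.Dict.empty], by simp [PySem.Dict.empty], by simp⟩
  have h := invA_foldl k xs [] PySem.Dict.empty h0
  simp only [List.nil_append] at h
  obtain ⟨hn, hm, hc⟩ := h
  set d := xs.foldl (stepA k) PySem.Dict.empty with hd
  refine ⟨?_, ?_, ?_⟩
  · have : d.items.map (fun p => k p.2) = d.items.map (·.1) :=
      List.map_congr_left (fun p hp => ((hm p hp).1).symm)
    simpa [PySem.Dict.values, List.map_map, Function.comp_def, this] using hn
  · intro v hv
    simp only [PySem.Dict.values, List.mem_map] at hv
    obtain ⟨p, hp, rfl⟩ := hv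
    obtain ⟨hk, hmem, hmax⟩ := hm p hp
    exact ⟨hmem, fun u hu hku => hmax u hu (by rw [hk]; exact hku)⟩
  · intro u hu
    have := hc u hu
    simp only [PySem.Dict.contains, List.any_eq_true] at this
    obtain ⟨p, hp, hbeq⟩ := this
    refine ⟨p.2, List.mem_map_of_mem hp, ?_⟩
    have h1 : p.1 = k u := by simpa using hbeq
    rw [← (hm p hp).1, h1]

-- ---------- side B: the sweep over the sorted list ----------

def stepB (k : (Int × Int) → Int) (acc : List (Int × Int)) (t : Int × Int) : List (Int × Int) :=
  match acc.getLast? with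
  | some w => if k w = k t then (if pvLt w t then acc.dropLast ++ [t] else acc) else acc ++ [t]
  | none => acc ++ [t]

def InvB (k : (Int × Int) → Int) (p acc : List (Int × Int)) : Prop :=
  (acc.map k).Nodup ∧
  (∀ t ∈ acc, t ∈ p ∧ ∀ u ∈ p, k u = k t → toLex u ≤ toLex t) ∧
  (∀ u ∈ p, ∃ t ∈ acc, k t = k u) ∧
  (match acc.getLast? with | none => p = [] | some w => ∀ u ∈ p, k u ≤ k w)

theorem invB_step (k : (Int × Int) → Int) (p acc : List (Int × Int)) (t : Int × Int)
    (h : InvB k p acc) (ht : ∀ u ∈ p, k u ≤ k t) : InvB k (p ++ [t]) (stepB k acc t) := by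
  obtain ⟨hn, hm, hc, hlast⟩ := h
  rcases hacc : acc.getLast? with _ | w
  · -- acc (hence p) is empty: append t
    have hpe : p = [] := by rw [hacc] at hlast; exact hlast
    have hae : acc = [] := List.getLast?_eq_none_iff.mp hacc
    subst hpe; subst hae
    have hstep0 : stepB k [] t = [t] := by simp [stepB]
    rw [hstep0]
    refine ⟨by simp, ?_, ?_, ?_⟩
    · intro x hx
      have hx' : x = t := by simpa using hx
      refine ⟨by simp [hx'], ?_⟩
      intro u hu _
      have hu' : u = t := by simpa using hu
      rw [hu', hx']
    · intro u hu
      have hu' : u = t := by simpa using hu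
      exact ⟨t, by simp, by rw [hu']⟩
    · intro u hu
      have hu' : u = t := by simpa using hu
      simp [hu']
  · have hlast' : ∀ u ∈ p, k u ≤ k w := by rw [hacc] at hlast; exact hlast
    have hane : acc ≠ [] := by intro h; rw [h] at hacc; simp at hacc
    have hglw : acc.getLast hane = w := by
      rw [List.getLast?_eq_some_getLast hane] at hacc
      exact Option.some_inj.mp hacc
    have hwmem : w ∈ acc := hglw ▸ List.getLast_mem hane
    have hsplit : acc.dropLast ++ [w] = acc := by
      rw [← hglw]; exact List.dropLast_append_getLast hane
    by_cases hkeq : k w = k t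
    · have hstep0 : stepB k acc t = if pvLt w t then acc.dropLast ++ [t] else acc := by
        simp [stepB, hacc, hkeq]
      have honly : ∀ x ∈ acc.dropLast, k x ≠ k w := by
        intro x hx
        have hmapn : ((acc.dropLast).map k ++ [k w]).Nodup := by
          have he : (acc.dropLast).map k ++ [k w] = (acc.dropLast ++ [w]).map k := by simp
          rw [he, hsplit]; exact hn
        rw [List.nodup_append] at hmapn
        exact fun hxe => (hmapn.2.2 (k x) (List.mem_map_of_mem hx) (k w) (by simp)) hxe
      by_cases hlt : pvLt w t = true
      · -- replace the last winner by t
        have htw : toLex w < toLex t := (pvLt_iff w t).mp hlt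
        rw [hstep0, if_pos hlt]
        refine ⟨?_, ?_, ?_, ?_⟩
        · have he : (acc.dropLast ++ [t]).map k = (acc.dropLast).map k ++ [k t] := by simp
          have he' : (acc.dropLast).map k ++ [k w] = acc.map k := by
            have := congrArg (List.map k) hsplit
            simpa using this
          rw [he, ← hkeq, he']; exact hn
        · intro x hx
          rcases List.mem_append.mp hx with hx | hx
          · have hxacc : x ∈ acc := by rw [← hsplit]; exact List.mem_append_left _ hx
            obtain ⟨h1, h2⟩ := hm x hxacc
            refine ⟨List.mem_append_left _ h1, ?_⟩
            intro u hu hku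
            rcases List.mem_append.mp hu with hu | hu
            · exact h2 u hu hku
            · have hu' : u = t := by simpa using hu
              rw [hu'] at hku
              exact absurd (by rw [← hku, hkeq] : k x = k w) (honly x hx)
          · have hx' : x = t := by simpa using hx
            refine ⟨List.mem_append_right _ (by simp [hx']), ?_⟩
            intro u hu hku
            rcases List.mem_append.mp hu with hu | hu
            · refine le_trans ((hm w hwmem).2 u hu ?_) (by rw [hx']; exact le_of_lt htw)
              rw [hku, hx', ← hkeq]
            · have hu' : u = t := by simpa using hu
              rw [hu', hx']
        · intro u hu
          rcases List.mem_append.mp hu with hu | hu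
          · obtain ⟨x, hx, hkx⟩ := hc u hu
            rw [← hsplit] at hx
            rcases List.mem_append.mp hx with hx | hx
            · exact ⟨x, List.mem_append_left _ hx, hkx⟩
            · have hx' : x = w := by simpa using hx
              rw [hx'] at hkx
              exact ⟨t, List.mem_append_right _ (by simp), by rw [← hkeq, hkx]⟩
          · have hu' : u = t := by simpa using hu
            exact ⟨t, List.mem_append_right _ (by simp), by rw [hu']⟩
        · show match (acc.dropLast ++ [t]).getLast? with
              | none => _ | some w' => ∀ u ∈ p ++ [t], k u ≤ k w'
          rw [List.getLast?_concat]
          intro u hu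
          rcases List.mem_append.mp hu with hu | hu
          · exact le_trans (hlast' u hu) (le_of_eq hkeq)
          · have hu' : u = t := by simpa using hu
            rw [hu']
      · -- keep the current winner
        have hwt : toLex t ≤ toLex w := (pvLt_false_iff w t).mp (by simpa using hlt)
        rw [hstep0, if_neg hlt]
        refine ⟨hn, ?_, ?_, ?_⟩
        · intro x hx
          obtain ⟨h1, h2⟩ := hm x hx
          refine ⟨List.mem_append_left _ h1, ?_⟩
          intro u hu hku
          rcases List.mem_append.mp hu with hu | hu
          · exact h2 u hu hku
          · have hu' : u = t := by simpa using hu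
            rw [hu'] at hku
            have hxw : x = w := by
              rw [← hsplit] at hx
              rcases List.mem_append.mp hx with hx | hx
              · exact absurd (by rw [← hku, hkeq] : k x = k w) (honly x hx)
              · simpa using hx
            rw [hu', hxw]; exact hwt
        · intro u hu
          rcases List.mem_append.mp hu with hu | hu
          · exact hc u hu
          · have hu' : u = t := by simpa using hu
            exact ⟨w, hwmem, by rw [hu', hkeq]⟩
        · show match acc.getLast? with | none => _ | some w' => ∀ u ∈ p ++ [t], k u ≤ k w'
          rw [hacc]
          intro u hu
          rcases List.mem_append.mp hu with hu | hu
          · exact hlast' u hu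
          · have hu' : u = t := by simpa using hu
            rw [hu']; exact le_of_eq hkeq.symm
    · -- a fresh key: append t
      have hstep0 : stepB k acc t = acc ++ [t] := by simp [stepB, hacc, hkeq]
      have hnew : ∀ x ∈ acc, k x ≠ k t := by
        intro x hx hxe
        have h1 : k x ≤ k w := hlast' x (hm x hx).1
        have h2 : k w ≤ k t := ht w (hm w hwmem).1
        exact hkeq (le_antisymm h2 (hxe ▸ h1))
      rw [hstep0]
      refine ⟨?_, ?_, ?_, ?_⟩
      · rw [List.map_append, List.nodup_append]
        refine ⟨hn, by simp, ?_⟩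
        intro a ha b hb
        have hb' : b = k t := by simpa using hb
        obtain ⟨x, hx, rfl⟩ := List.mem_map.mp ha
        rw [hb']
        exact hnew x hx
      · intro x hx
        rcases List.mem_append.mp hx with hx | hx
        · obtain ⟨h1, h2⟩ := hm x hx
          refine ⟨List.mem_append_left _ h1, ?_⟩
          intro u hu hku
          rcases List.mem_append.mp hu with hu | hu
          · exact h2 u hu hku
          · have hu' : u = t := by simpa using hu
            rw [hu'] at hku
            exact absurd hku.symm (hnew x hx)
        · have hx' : x = t := by simpa using hx
          refine ⟨List.mem_append_right _ (by simp [hx']), ?_⟩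
          intro u hu hku
          rcases List.mem_append.mp hu with hu | hu
          · obtain ⟨y, hy, hky⟩ := hc u hu
            rw [hx'] at hku
            exact absurd (hky.trans hku) (hnew y hy)
          · have hu' : u = t := by simpa using hu
            rw [hu', hx']
      · intro u hu
        rcases List.mem_append.mp hu with hu | hu
        · obtain ⟨x, hx, hkx⟩ := hc u hu
          exact ⟨x, List.mem_append_left _ hx, hkx⟩
        · have hu' : u = t := by simpa using hu
          exact ⟨t, List.mem_append_right _ (by simp), by rw [hu']⟩
      · show match (acc ++ [t]).getLast? with | none => _ | some w' => ∀ u ∈ p ++ [t], k u ≤ k w'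
        rw [List.getLast?_concat]
        intro u hu
        rcases List.mem_append.mp hu with hu | hu
        · exact ht u hu
        · have hu' : u = t := by simpa using hu
          rw [hu']

theorem invB_foldl (k : (Int × Int) → Int) (rest : List (Int × Int)) :
    ∀ (p acc : List (Int × Int)), InvB k p acc →
      (∀ u ∈ p, ∀ v ∈ rest, k u ≤ k v) → rest.Pairwise (fun a b => k a ≤ k b) →
      InvB k (p ++ rest) (rest.foldl (stepB k) acc) := by
  induction rest with
  | nil => intro p acc h _ _; simpa using h
  | cons t rest ih =>
    intro p acc h hcross hpair
    have ht : ∀ u ∈ p, k u ≤ k t := fun u hu => hcross u hu t (by simp)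
    have h' := invB_step k p acc t h ht
    have hcross' : ∀ u ∈ p ++ [t], ∀ v ∈ rest, k u ≤ k v := by
      intro u hu v hv
      rcases List.mem_append.mp hu with hu | hu
      · exact hcross u hu v (by simp [hv])
      · simp only [List.mem_singleton] at hu
        subst hu
        exact (List.pairwise_cons.mp hpair).1 v hv
    have := ih (p ++ [t]) (stepB k acc t) h' hcross' (List.pairwise_cons.mp hpair).2
    simpa [List.append_assoc] using this

theorem goodW_B (k : (Int × Int) → Int) (xs : List (Int × Int)) :
    GoodW k xs ((PySem.List.sorted xs k).foldl (stepB k) []) := by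
  set ordered := PySem.List.sorted xs k with hord
  have hperm : ordered.Perm xs := PySem.List.sorted_perm xs k false
  have h0 : InvB k [] [] := ⟨by simp, by simp, by simp, by simp⟩
  have h := invB_foldl k ordered [] [] h0 (by simp) (PySem.List.sorted_pairwise xs k)
  simp only [List.nil_append] at h
  obtain ⟨hn, hm, hc, _⟩ := h
  refine ⟨hn, ?_, ?_⟩
  · intro t htw
    obtain ⟨hmem, hmax⟩ := hm t htw
    exact ⟨hperm.mem_iff.mp hmem, fun u hu => hmax u (hperm.mem_iff.mpr hu)⟩
  · intro u hu
    exact hc u (hperm.mem_iff.mpr hu)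

-- ===== VERDICT (by name: the statement is the Claim_ definition above) =====
theorem distinct_c_spec : Claim_equal_distinct_c := by
  intro sample_list key_ele _ _
  show PySem.List.sorted2
      ((PySem.List.pyRange 0 (PySem.List.len sample_list)).foldl
        (fun d m => stepA (pvKey key_ele) d (PySem.List.pyGetD sample_list m (0, 0)))
        PySem.Dict.empty).values (·.1) (·.2)
    = PySem.List.sorted2
      ((PySem.List.sorted sample_list (pvKey key_ele)).foldl (stepB (pvKey key_ele)) []) (·.1) (·.2)
  rw [PySem.List.foldl_pyRange_pyGetD sample_list (0, 0) (stepA (pvKey key_ele))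
      PySem.Dict.empty (le_refl 0)]
  simp only [Int.toNat_zero, List.drop_zero]
  exact sorted2_congr_perm _ _
    (goodW_perm (pvKey key_ele) sample_list _ _
      (goodW_A (pvKey key_ele) sample_list)
      (goodW_B (pvKey key_ele) sample_list))
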